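-- pv_equiv track=rewrite | github.com/N0taR0b0t/MiniScraper | token_budget.py | select_shortest_texts
-- ===== SOURCE A (Python) =====
-- def select_shortest_texts(data, char_budget):
--     # Sort the data by the length of the "Text" field
--     sorted_data = sorted(data, key=lambda x: len(x['Text']))
--
--     selected_entries = []
--     current_total_length = 0
--
--     for entry in sorted_data:
--         entry_length = len(entry['Text'])
--
--         if current_total_length + entry_length < char_budget:
--             selected_entries.append(entry)
--             current_total_length += entry_length
--         else:
--             # Add a partial text entry if there's any remaining budget
--             remaining_budget = char_budget - current_total_length
--             if remaining_budget > 0: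
--                 partial_entry = entry.copy()
--                 partial_entry['Text'] = entry['Text'][:remaining_budget]
--                 selected_entries.append(partial_entry)
--                 current_total_length += remaining_budget
--             break
--
--     return selected_entries
-- ===== SOURCE B (Python) =====
-- def select_shortest_texts(data, char_budget):
--     # Same stable sort, then prefix sums + hand-written binary search for the
--     # cutoff k = number of entries whose running total stays under the budget.
--     sorted_data = sorted(data, key=lambda e: len(e['Text']))
--     prefix = [0]
--     for e in sorted_data:
--         prefix.append(prefix[-1] + len(e['Text']))
--     lo, hi = 0, len(sorted_data)
--     while lo < hi:
--         mid = (lo + hi) // 2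
--         if prefix[mid + 1] < char_budget:
--             lo = mid + 1
--         else:
--             hi = mid
--     result = sorted_data[:lo]
--     if lo < len(sorted_data):
--         remaining = char_budget - prefix[lo]
--         if remaining > 0:
--             partial = sorted_data[lo].copy()
--             partial['Text'] = partial['Text'][:remaining]
--             result.append(partial)
--     return result
-- ===== Notes on version B (the rewrite author's own statement) =====
-- stated objective: alternative
-- what changed: Replaces A's greedy accumulate-and-break scan over the sorted entries by cumulative prefix sums plus a hand-written binary search for the cutoff index, then assembles the result as a slice plus an optional partial entry.
-- outside the precondition, e.g. on select_shortest_texts([{'Url': 'u'}], 5): A raises KeyError, B raises KeyError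
import Mathlib
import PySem

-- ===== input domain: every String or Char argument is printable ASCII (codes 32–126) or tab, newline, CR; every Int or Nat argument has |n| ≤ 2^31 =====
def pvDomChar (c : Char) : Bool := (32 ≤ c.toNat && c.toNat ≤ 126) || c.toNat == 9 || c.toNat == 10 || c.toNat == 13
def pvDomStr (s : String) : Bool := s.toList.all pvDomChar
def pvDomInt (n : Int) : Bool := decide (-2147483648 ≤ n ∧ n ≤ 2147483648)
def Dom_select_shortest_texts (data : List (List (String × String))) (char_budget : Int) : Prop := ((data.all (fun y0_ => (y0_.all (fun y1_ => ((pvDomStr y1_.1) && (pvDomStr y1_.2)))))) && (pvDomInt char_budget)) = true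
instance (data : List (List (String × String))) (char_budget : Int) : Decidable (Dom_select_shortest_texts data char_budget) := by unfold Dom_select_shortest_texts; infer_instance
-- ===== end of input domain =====

-- B replaces A's greedy accumulate-and-break loop by prefix sums plus a binary search
-- for the cutoff index (objective: alternative decomposition, same result).

-- ===== PORT A =====

-- entry['Text'] (Pre_ guarantees the key is present, so the default is never used)
def pvText (e : List (String × String)) : String :=
  (PySem.Dict.mk e).getD "Text" ""

-- entry.copy(); partial_entry['Text'] = entry['Text'][:r]  (insert overwrites in place)
def pvPartial (e : List (String × String)) (r : Int) : List (String × String) :=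
  ((PySem.Dict.mk e).insert "Text" (PySem.Str.slice (pvText e) none (some r))).items

-- the 'for entry in sorted_data' loop of A, with its break
def pvLoopA (budget : Int) : List (List (String × String)) → Int → List (List (String × String)) → List (List (String × String))
  | [], _, acc => acc
  | e :: rest, total, acc =>
    let l := PySem.Str.len (pvText e)
    if total + l < budget then pvLoopA budget rest (total + l) (acc ++ [e])
    else
      let r := budget - total
      if r > 0 then acc ++ [pvPartial e r] else acc

def select_shortest_texts (data : List (List (String × String))) (char_budget : Int) : List (List (String × String)) :=
  pvLoopA char_budget (PySem.List.sorted data (fun e => PySem.Str.len (pvText e))) 0 []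

-- ===== PORT B =====

-- the hand-written binary search of Source B: while lo < hi: mid = (lo+hi)//2; …
def pvBS (pfx : List Int) (b : Int) (lo hi : Nat) : Nat :=
  if _h : lo < hi then
    let mid := (lo + hi) / 2
    if PySem.List.pyGetD pfx ((mid : Int) + 1) 0 < b then pvBS pfx b (mid + 1) hi
    else pvBS pfx b lo mid
  else lo
termination_by hi - lo
decreasing_by all_goals omega

def select_shortest_texts_alt (data : List (List (String × String))) (char_budget : Int) : List (List (String × String)) :=
  let sd := PySem.List.sorted data (fun e => PySem.Str.len (pvText e))
  -- prefix = [0]; for e in sorted_data: prefix.append(prefix[-1] + len(e['Text']))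
  let pfx := sd.foldl (fun p e => p ++ [PySem.List.pyGetD p (-1) 0 + PySem.Str.len (pvText e)]) [0]
  let lo := pvBS pfx char_budget 0 sd.length
  let result := PySem.List.slice sd none (some (lo : Int))   -- sorted_data[:lo]
  if lo < sd.length then
    let remaining := char_budget - PySem.List.pyGetD pfx (lo : Int) 0
    if remaining > 0 then result ++ [pvPartial (PySem.List.pyGetD sd (lo : Int) []) remaining]
    else result
  else result

-- ===== PRECONDITION & SPEC =====
-- Pre_ excludes exactly the inputs where some entry has no 'Text' key: there A raises
-- KeyError inside the sort key (and B's Python raises identically).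
def Pre_select_shortest_texts (data : List (List (String × String))) (char_budget : Int) : Prop :=
  ∀ e ∈ data, (PySem.Dict.mk e).contains "Text" = true
instance (data : List (List (String × String))) (char_budget : Int) : Decidable (Pre_select_shortest_texts data char_budget) := by unfold Pre_select_shortest_texts; infer_instance

def pvWitness_select_shortest_texts : (List (List (String × String))) × Int :=
  ([[("Text", "hello"), ("Url", "u")], [("Text", "hi")]], 6)

def Spec_select_shortest_texts (data : List (List (String × String))) (char_budget : Int) (out : List (List (String × String))) : Prop := out = select_shortest_texts_alt data char_budget
instance (data : List (List (String × String))) (char_budget : Int) (out : List (List (String × String))) : Decidable (Spec_select_shortest_texts data char_budget out) := by unfold Spec_select_shortest_texts; infer_instance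

-- ===== CLAIM (what is proved, stated in full; the proofs are below) =====
def Claim_equal_select_shortest_texts : Prop := ∀ (data : List (List (String × String))) (char_budget : Int), Dom_select_shortest_texts data char_budget → Pre_select_shortest_texts data char_budget → Spec_select_shortest_texts data char_budget (select_shortest_texts data char_budget)

-- ===== LEMMAS AND PROOFS =====

-- running total of text lengths of the first entries
def pvSum (xs : List (List (String × String))) : Int :=
  (xs.map (fun e => PySem.Str.len (pvText e))).sum

theorem pvLen_nonneg (e : List (String × String)) : 0 ≤ PySem.Str.len (pvText e) := by
  simp [pysem]

theorem pvSum_take_mono (xs : List (List (String × String))) {i j : Nat} (h : i ≤ j) :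
    pvSum (xs.take i) ≤ pvSum (xs.take j) := by
  have hj : j = i + (j - i) := by omega
  rw [hj, List.take_add]
  simp only [pvSum, List.map_append, List.sum_append, le_add_iff_nonneg_right]
  apply List.sum_nonneg
  intro x hx
  simp only [List.mem_map] at hx
  obtain ⟨e, he, rfl⟩ := hx
  exact pvLen_nonneg e

-- B's prefix-building fold, characterised: it produces the running totals
theorem pvPrefix_eq (xs : List (List (String × String))) :
    ∀ (init : List Int) (t : Int),
    xs.foldl (fun p e => p ++ [PySem.List.pyGetD p (-1) 0 + PySem.Str.len (pvText e)]) (init ++ [t])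
      = init ++ (List.range (xs.length + 1)).map (fun i => t + pvSum (xs.take i)) := by
  induction xs with
  | nil => intro init t; simp [pvSum]
  | cons e rest ih =>
    intro init t
    simp only [List.foldl_cons, PySem.List.pyGetD_neg_one_append_singleton]
    rw [ih (init ++ [t]) (t + PySem.Str.len (pvText e)), List.append_assoc]
    congr 1
    rw [List.length_cons, List.range_succ_eq_map (n := rest.length + 1), List.map_cons,
        List.map_map, List.singleton_append]
    congr 1
    · simp [pvSum]
    · apply List.map_congr_left; intro i _hi
      simp [pvSum, add_assoc]

-- binary-search invariant: below the result the prefix test holds, from the result on it fails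
theorem pvBS_spec (pfx : List Int) (b : Int) (N : Nat)
    (mono : ∀ i j : Nat, i ≤ j → j < N →
      PySem.List.pyGetD pfx ((j : Int) + 1) 0 < b → PySem.List.pyGetD pfx ((i : Int) + 1) 0 < b) :
    ∀ d lo hi, hi - lo = d → lo ≤ hi → hi ≤ N →
    (∀ i, i < lo → PySem.List.pyGetD pfx ((i : Int) + 1) 0 < b) →
    (∀ i, hi ≤ i → i < N → ¬ PySem.List.pyGetD pfx ((i : Int) + 1) 0 < b) →
    (pvBS pfx b lo hi ≤ N ∧
     (∀ i, i < pvBS pfx b lo hi → PySem.List.pyGetD pfx ((i : Int) + 1) 0 < b) ∧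
     (∀ i, pvBS pfx b lo hi ≤ i → i < N → ¬ PySem.List.pyGetD pfx ((i : Int) + 1) 0 < b)) := by
  intro d
  induction d using Nat.strong_induction_on with
  | _ d ih =>
    intro lo hi hd hle hN hlow hhigh
    rw [pvBS]
    by_cases h : lo < hi
    · simp only [h, dite_true]
      by_cases hq : PySem.List.pyGetD pfx (((lo + hi) / 2 : Nat) + 1) 0 < b
      · push_cast at hq ⊢
        simp only [hq, if_true]
        refine ih (hi - ((lo + hi) / 2 + 1)) (by omega) ((lo + hi) / 2 + 1) hi (by omega) (by omega)
          hN ?_ hhigh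
        intro i hi'
        by_cases hlo : i < lo
        · exact hlow i hlo
        · refine mono i ((lo + hi) / 2) (by omega) (by omega) ?_
          push_cast
          exact hq
      · push_cast at hq ⊢
        simp only [hq, if_false]
        refine ih ((lo + hi) / 2 - lo) (by omega) lo ((lo + hi) / 2) (by omega) (by omega)
          (by omega) hlow ?_
        intro i hge hiN hc
        exact hq (mono ((lo + hi) / 2) i hge hiN hc)
    · simp only [h, dite_false]
      have : lo = hi := by omega
      exact ⟨by omega, hlow, by simpa [this] using hhigh⟩

theorem pvSum_cons (e : List (String × String)) (xs : List (List (String × String))) :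
    pvSum (e :: xs) = PySem.Str.len (pvText e) + pvSum xs := by simp [pvSum]

-- A's greedy loop, characterised by the cutoff k (k = number of entries taken in full)
theorem pvLoopA_eq (b : Int) :
    ∀ (xs : List (List (String × String))) (t : Int) (acc : List (List (String × String))) (k : Nat),
    k ≤ xs.length →
    (∀ i, i < k → t + pvSum (xs.take (i + 1)) < b) →
    (k < xs.length → ¬ t + pvSum (xs.take (k + 1)) < b) →
    pvLoopA b xs t acc = acc ++ xs.take k ++
      (if k < xs.length then
        (if b - (t + pvSum (xs.take k)) > 0
         then [pvPartial (xs.getD k []) (b - (t + pvSum (xs.take k)))] else [])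
       else []) := by
  intro xs
  induction xs with
  | nil =>
    intro t acc k hk _ _
    have : k = 0 := by simpa using hk
    subst this
    simp [pvLoopA]
  | cons e rest ih =>
    intro t acc k hk hlt hge
    match k with
    | 0 =>
      have hne : ¬ t + PySem.Str.len (pvText e) < b := by
        have := hge (by simp)
        simpa [pvSum_cons, pvSum] using this
      simp only [pvLoopA, hne, if_false]
      simp only [List.take_zero, List.length_cons, Nat.zero_lt_succ, if_true, List.getD_cons_zero,
        pvSum, List.map_nil, List.sum_nil, add_zero, List.append_nil]
      split_ifs <;> simp
    | k' + 1 =>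
      have h0 : t + PySem.Str.len (pvText e) < b := by
        have := hlt 0 (by omega)
        simpa [pvSum_cons, pvSum] using this
      simp only [pvLoopA, h0, if_true]
      rw [ih (t + PySem.Str.len (pvText e)) (acc ++ [e]) k' (by simpa using hk)
        (fun i hi => by have := hlt (i + 1) (by omega); simpa [pvSum_cons, add_assoc] using this)
        (fun hkl => by
          have := hge (by simpa using hkl)
          simpa [pvSum_cons, add_assoc] using this)]
      simp only [List.take_succ_cons, List.length_cons, Nat.add_lt_add_iff_right,
        List.getD_cons_succ, pvSum_cons, List.append_assoc, List.singleton_append, add_assoc]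

theorem main_eq (data : List (List (String × String))) (b : Int) :
    select_shortest_texts data b = select_shortest_texts_alt data b := by
  unfold select_shortest_texts select_shortest_texts_alt
  set sd := PySem.List.sorted data (fun e => PySem.Str.len (pvText e)) with hsd
  set n := sd.length with hn
  have hpfx : sd.foldl (fun p e => p ++ [PySem.List.pyGetD p (-1) 0 + PySem.Str.len (pvText e)]) [0]
      = (List.range (n + 1)).map (fun i => pvSum (sd.take i)) := by
    have := pvPrefix_eq sd [] 0
    simpa using this
  set pfx := sd.foldl (fun p e => p ++ [PySem.List.pyGetD p (-1) 0 + PySem.Str.len (pvText e)]) [0] with hpfxdef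
  have hget : ∀ m : Nat, m ≤ n → PySem.List.pyGetD pfx (m : Int) 0 = pvSum (sd.take m) := by
    intro m hm
    rw [hpfx, PySem.List.pyGetD_natCast]
    rw [List.getD_eq_getElem?_getD, List.getElem?_map, List.getElem?_range (by omega)]
    simp
  have hQ : ∀ i : Nat, i < n →
      (PySem.List.pyGetD pfx ((i : Int) + 1) 0 < b ↔ pvSum (sd.take (i + 1)) < b) := by
    intro i hi
    have : ((i : Int) + 1) = ((i + 1 : Nat) : Int) := by push_cast; ring
    rw [this, hget (i + 1) (by omega)]
  have mono : ∀ i j : Nat, i ≤ j → j < n →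
      PySem.List.pyGetD pfx ((j : Int) + 1) 0 < b → PySem.List.pyGetD pfx ((i : Int) + 1) 0 < b := by
    intro i j hij hj hQj
    rw [hQ j hj] at hQj
    rw [hQ i (by omega)]
    have := pvSum_take_mono sd (Nat.add_le_add_right hij 1)
    omega
  obtain ⟨hrN, hrlt, hrge⟩ := pvBS_spec pfx b n mono n 0 n rfl (by omega) le_rfl
    (by omega) (by intro i h1 h2; omega)
  set r := pvBS pfx b 0 n with hr
  rw [pvLoopA_eq b sd 0 [] r hrN
    (fun i hi => by
      have := (hQ i (by omega)).mp (hrlt i hi)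
      omega)
    (fun hrn => by
      have := hrge r le_rfl hrn
      rw [hQ r hrn] at this
      omega)]
  dsimp only
  rw [show sd.length = n from rfl, ← hr, PySem.List.slice_to_natCast]
  by_cases hlt : r < n
  · rw [← hpfxdef]
    simp only [if_pos hlt, hget r (by omega), PySem.List.pyGetD_natCast]
    have h0 : (0 : Int) + pvSum (sd.take r) = pvSum (sd.take r) := by ring
    rw [h0]
    split_ifs <;> simp
  · rw [if_neg hlt]
    simp [hlt]

-- ===== VERDICT (by name: the statement is the Claim_ definition above) =====
theorem select_shortest_texts_spec : Claim_equal_select_shortest_texts := by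
  intro data char_budget _dom _pre
  unfold Spec_select_shortest_texts
  exact main_eq data char_budget
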